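-- pv_equiv track=rewrite | github.com/Khaledal3atel/- | Mmmain.py | assemble_sentence
-- ===== SOURCE A (Python) =====
-- def assemble_word(disassembled_word):
--     return disassembled_word.replace(' ', '')
--
-- def assemble_sentence(disassembled_sentence):
--     words = disassembled_sentence.split()
--     assembled_words = []
--     current_word = []
--
--     for char in words:
--         if char.strip():
--             current_word.append(char)
--         if len(current_word) > 0 and (not char.strip() or char == words[-1]):
--             assembled_words.append(assemble_word(' '.join(current_word)))
--             current_word = []
--
--     return ' '.join(assembled_words)
-- ===== SOURCE B (Python) =====
-- def assemble_sentence(disassembled_sentence):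
--     return ''.join(disassembled_sentence.split())
-- ===== Notes on version B (the rewrite author's own statement) =====
-- stated objective: simpler
-- what changed: B replaces A's accumulate-and-flush loop (which flushes a group at every token equal to the last token) by a single join of all whitespace-split tokens.
-- intended difference: On inputs whose last whitespace-separated token also occurs earlier, A returns the concatenated tokens broken by a space at every earlier occurrence of that token (an accident of its flush condition char == words[-1]); B returns the plain concatenation of all tokens, which is the intended assembly of the sentence. — e.g. on assemble_sentence("a b a"): A returns "a ba", B returns "aba"
import Mathlib
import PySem

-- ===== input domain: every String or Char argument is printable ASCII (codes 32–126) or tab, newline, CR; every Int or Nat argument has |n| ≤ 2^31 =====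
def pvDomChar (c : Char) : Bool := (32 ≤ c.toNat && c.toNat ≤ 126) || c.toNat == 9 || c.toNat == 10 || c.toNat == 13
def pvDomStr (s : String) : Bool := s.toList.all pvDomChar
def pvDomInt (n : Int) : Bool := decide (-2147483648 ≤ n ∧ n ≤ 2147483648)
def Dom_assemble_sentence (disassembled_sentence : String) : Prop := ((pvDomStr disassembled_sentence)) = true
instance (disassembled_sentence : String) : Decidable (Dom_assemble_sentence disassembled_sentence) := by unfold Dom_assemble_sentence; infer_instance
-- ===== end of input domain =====

-- B joins all whitespace-split tokens directly; A's flush at every occurrence of the last token is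
-- stated as an intended difference (D_ below). Objective: simpler.

-- ===== PORT A =====
def assemble_word (disassembled_word : String) : String :=
  PySem.Str.replace disassembled_word " " ""

def assemble_sentence (disassembled_sentence : String) : String :=
  let words := PySem.Str.split₀ disassembled_sentence
  let st := words.foldl (fun (st : List String × List String) ch =>
    let current_word := if PySem.Str.strip ch ≠ "" then st.2 ++ [ch] else st.2
    if current_word.length > 0 ∧ (PySem.Str.strip ch = "" ∨ PySem.List.pyGet? words (-1) = some ch) then
      (st.1 ++ [assemble_word (PySem.Str.join " " current_word)], ([] : List String))
    else (st.1, current_word)) ([], [])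
  PySem.Str.join " " st.1

-- ===== PORT B =====
def assemble_sentence_alt (disassembled_sentence : String) : String :=
  PySem.Str.join "" (PySem.Str.split₀ disassembled_sentence)

-- ===== PRECONDITION & SPEC =====
-- On inputs whose last whitespace-separated token also occurs earlier, A returns the concatenated
-- tokens broken by a space at every earlier occurrence of that token (an accident of its flush
-- condition char == words[-1]); B returns the plain concatenation of all tokens, the intended assembly.
def D_assemble_sentence (disassembled_sentence : String) : Prop :=
  ((PySem.Str.split₀ disassembled_sentence).getLast?.getD "")
    ∈ (PySem.Str.split₀ disassembled_sentence).dropLast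
instance (disassembled_sentence : String) : Decidable (D_assemble_sentence disassembled_sentence) := by
  unfold D_assemble_sentence; infer_instance

def Spec_assemble_sentence (disassembled_sentence : String) (out : String) : Prop :=
  ¬ D_assemble_sentence disassembled_sentence → out = assemble_sentence_alt disassembled_sentence
instance (disassembled_sentence : String) (out : String) : Decidable (Spec_assemble_sentence disassembled_sentence out) := by
  unfold Spec_assemble_sentence; infer_instance

def pvDiffWitness_assemble_sentence : String := "a b a"
def pvDiffWitnessOut_assemble_sentence : String × String := ("a ba", "aba")

-- ===== CLAIM (what is proved, stated in full; the proofs are below) =====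
def Claim_unchanged_assemble_sentence : Prop := ∀ (disassembled_sentence : String), Dom_assemble_sentence disassembled_sentence → Spec_assemble_sentence disassembled_sentence (assemble_sentence disassembled_sentence)
def Claim_changed_assemble_sentence : Prop := Dom_assemble_sentence (pvDiffWitness_assemble_sentence) ∧ D_assemble_sentence (pvDiffWitness_assemble_sentence) ∧ assemble_sentence (pvDiffWitness_assemble_sentence) = pvDiffWitnessOut_assemble_sentence.1 ∧ assemble_sentence_alt (pvDiffWitness_assemble_sentence) = pvDiffWitnessOut_assemble_sentence.2 ∧ pvDiffWitnessOut_assemble_sentence.1 ≠ pvDiffWitnessOut_assemble_sentence.2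
def Claim_exact_assemble_sentence : Prop := ∀ (disassembled_sentence : String), Dom_assemble_sentence disassembled_sentence → D_assemble_sentence disassembled_sentence → assemble_sentence disassembled_sentence ≠ assemble_sentence_alt disassembled_sentence

-- ===== LEMMAS AND PROOFS =====

-- a token of str.split(): nonempty, no whitespace characters
def TokOK (w : String) : Prop :=
  w.toList ≠ [] ∧ ∀ c ∈ w.toList, PySem.Chars.isspace c = false

-- A's grouping: flush the accumulated group at every occurrence of L
def groupsC (L : String) : List String → List String → List String
  | _, [] => []
  | cur, w :: t =>
    if w = L then PySem.Str.join "" (cur ++ [w]) :: groupsC L [] t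
    else groupsC L (cur ++ [w]) t

lemma split₀_go_tok (rest : List Char) : ∀ (cur : List Char) (acc : List (List Char)),
    (∀ c ∈ cur, PySem.Chars.isspace c = false) →
    (∀ t ∈ acc, t ≠ [] ∧ ∀ c ∈ t, PySem.Chars.isspace c = false) →
    ∀ t ∈ PySem.Chars.split₀.go rest cur acc, t ≠ [] ∧ ∀ c ∈ t, PySem.Chars.isspace c = false := by
  induction rest with
  | nil =>
    intro cur acc hcur hacc t ht
    by_cases hc : cur.isEmpty
    · rw [PySem.Chars.split₀.go] at ht
      simp only [hc, if_pos] at ht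
      exact hacc t (by simpa using ht)
    · rw [PySem.Chars.split₀.go] at ht
      simp only [hc, Bool.false_eq_true, if_false] at ht
      simp only [List.mem_reverse, List.mem_cons] at ht
      rcases ht with h | h
      · subst h
        refine ⟨by simpa [List.isEmpty_iff] using hc, ?_⟩
        intro c hcmem; exact hcur c (by simpa using hcmem)
      · exact hacc t h
  | cons c rest ih =>
    intro cur acc hcur hacc t ht
    by_cases hs : PySem.Chars.isspace c
    · by_cases hc : cur.isEmpty
      · rw [PySem.Chars.split₀.go] at ht
        simp only [hs, hc, if_pos] at ht
        exact ih [] acc (by simp) hacc t ht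
      · rw [PySem.Chars.split₀.go] at ht
        simp only [hs, hc, Bool.false_eq_true, if_pos, if_false] at ht
        refine ih [] (cur.reverse :: acc) (by simp) ?_ t ht
        intro u hu
        rcases List.mem_cons.mp hu with h | h
        · subst h
          refine ⟨by simpa [List.isEmpty_iff] using hc, ?_⟩
          intro d hd; exact hcur d (by simpa using hd)
        · exact hacc u h
    · rw [PySem.Chars.split₀.go] at ht
      simp only [hs, Bool.false_eq_true, if_false] at ht
      refine ih (c :: cur) acc ?_ hacc t ht
      intro d hd
      rcases List.mem_cons.mp hd with h | h
      · subst h; simpa using hs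
      · exact hcur d h

lemma tok_of_mem_split₀ (s : String) : ∀ w ∈ PySem.Str.split₀ s, TokOK w := by
  intro w hw
  simp only [PySem.Str.split₀, List.mem_map] at hw
  obtain ⟨t, ht, rfl⟩ := hw
  have := split₀_go_tok s.toList [] [] (by simp) (by simp) t ht
  exact ⟨by simpa [String.toList_ofList] using this.1,
         by simpa [String.toList_ofList] using this.2⟩

lemma dropWhile_isspace_eq_self (t : List Char)
    (h : ∀ c ∈ t, PySem.Chars.isspace c = false) :
    t.dropWhile PySem.Chars.isspace = t := by
  cases t with
  | nil => rfl
  | cons c t' => simp [h c (List.mem_cons_self)]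

lemma strip_eq_self_of_tok (w : String) (h : TokOK w) :
    PySem.Str.strip w = w ∧ w ≠ "" := by
  obtain ⟨hne, hsp⟩ := h
  constructor
  · have h1 : PySem.Chars.lstrip w.toList = w.toList :=
      dropWhile_isspace_eq_self _ hsp
    have h2 : PySem.Chars.rstrip w.toList = w.toList := by
      unfold PySem.Chars.rstrip
      rw [dropWhile_isspace_eq_self _ (by intro c hc; exact hsp c (by simpa using hc))]
      simp
    calc PySem.Str.strip w = String.ofList (PySem.Chars.strip w.toList) := rfl
      _ = w := by unfold PySem.Chars.strip; rw [h1, h2]; simp [String.ofList_toList]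
  · intro hcon
    exact hne (by simp [hcon])

lemma replace_go_space (fuel : Nat) : ∀ (l acc : List Char), l.length ≤ fuel →
    PySem.Chars.replace.go [' '] [] fuel l acc = acc.reverse ++ l.filter (· != ' ') := by
  induction fuel with
  | zero =>
    intro l acc hl
    have : l = [] := List.eq_nil_of_length_eq_zero (Nat.le_zero.mp hl)
    subst this; simp [PySem.Chars.replace.go]
  | succ fuel ih =>
    intro l acc hl
    cases l with
    | nil => simp [PySem.Chars.replace.go]
    | cons c t =>
      by_cases hc : c = ' '
      · subst hc
        have hpre : [' '].isPrefixOf (' ' :: t) = true := by simp [List.isPrefixOf]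
        simp only [PySem.Chars.replace.go, hpre, if_pos]
        rw [ih _ _ (by simpa using Nat.le_of_succ_le_succ hl)]
        simp
      · have hpre : [' '].isPrefixOf (c :: t) = false := by
          simp [List.isPrefixOf]; intro h; exact absurd h.symm hc
        simp only [PySem.Chars.replace.go, hpre, Bool.false_eq_true, if_false]
        rw [ih _ _ (by simpa using Nat.le_of_succ_le_succ hl)]
        simp [hc]

lemma replace_space_filter (cs : List Char) :
    PySem.Chars.replace cs [' '] [] = cs.filter (· != ' ') := by
  unfold PySem.Chars.replace
  simp only [List.isEmpty_cons, Bool.false_eq_true, if_false]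
  exact replace_go_space cs.length cs [] le_rfl

lemma filter_space_eq_self (t : List Char) (h : ∀ c ∈ t, c ≠ ' ') :
    t.filter (· != ' ') = t :=
  List.filter_eq_self.mpr (fun c hc => by simpa using h c hc)

lemma join_space_filter (toks : List (List Char))
    (h : ∀ t ∈ toks, ∀ c ∈ t, c ≠ ' ') :
    (PySem.Chars.join [' '] toks).filter (· != ' ') = PySem.Chars.join [] toks := by
  induction toks with
  | nil => simp [PySem.Chars.join_nil]
  | cons a rest ih =>
    cases rest with
    | nil =>
      rw [PySem.Chars.join_singleton, PySem.Chars.join_singleton]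
      exact filter_space_eq_self a (h a (List.mem_cons_self))
    | cons b rest' =>
      rw [PySem.Chars.join_cons_cons, PySem.Chars.join_cons_cons]
      rw [List.filter_append, List.filter_append]
      rw [filter_space_eq_self a (h a (List.mem_cons_self)),
          ih (fun t ht c hc => h t (List.mem_cons_of_mem _ ht) c hc)]
      simp

lemma assemble_word_join (cur : List String) (h : ∀ w ∈ cur, TokOK w) :
    assemble_word (PySem.Str.join " " cur) = PySem.Str.join "" cur := by
  unfold assemble_word PySem.Str.replace PySem.Str.join
  congr 1
  rw [String.toList_ofList]
  have hsp : " ".toList = [' '] := rfl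
  have he : "".toList = ([] : List Char) := rfl
  rw [hsp, he, replace_space_filter]
  apply join_space_filter
  intro t ht c hc
  simp only [List.mem_map] at ht
  obtain ⟨w, hw, rfl⟩ := ht
  intro hcon
  have := (h w hw).2 c hc
  rw [hcon] at this
  exact absurd this (by decide)

lemma pyGet_neg_one {α : Type} (xs : List α) (h : xs ≠ []) :
    PySem.List.pyGet? xs (-1) = xs.getLast? := by
  simp only [PySem.List.pyGet?, PySem.List.pyIdx?]
  have hlen : 1 ≤ xs.length := by
    cases xs with
    | nil => exact absurd rfl h
    | cons a t => simp
  rw [List.getLast?_eq_getElem?]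
  simp [hlen]

lemma A_fold (words : List String) (L : String)
    (hL : PySem.List.pyGet? words (-1) = some L) :
    ∀ (ws acc cur : List String),
    (∀ w ∈ ws, TokOK w) → (∀ w ∈ cur, TokOK w) →
    (ws.foldl (fun (st : List String × List String) ch =>
      if (if PySem.Str.strip ch ≠ "" then st.2 ++ [ch] else st.2).length > 0 ∧
          (PySem.Str.strip ch = "" ∨ PySem.List.pyGet? words (-1) = some ch) then
        (st.1 ++ [assemble_word (PySem.Str.join " "
            (if PySem.Str.strip ch ≠ "" then st.2 ++ [ch] else st.2))], ([] : List String))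
      else (st.1, if PySem.Str.strip ch ≠ "" then st.2 ++ [ch] else st.2)) (acc, cur)).1
    = acc ++ groupsC L cur ws := by
  intro ws
  induction ws with
  | nil => intro acc cur _ _; simp [groupsC]
  | cons w t ih =>
    intro acc cur hws hcur
    have hw : TokOK w := hws w (List.mem_cons_self)
    obtain ⟨hstrip, hne⟩ := strip_eq_self_of_tok w hw
    have htok : ∀ x ∈ t, TokOK x := fun x hx => hws x (List.mem_cons_of_mem _ hx)
    have hcur' : ∀ x ∈ cur ++ [w], TokOK x := by
      intro x hx
      rcases List.mem_append.mp hx with h | h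
      · exact hcur x h
      · rw [List.mem_singleton.mp h]; exact hw
    simp only [List.foldl_cons]
    rw [show (if PySem.Str.strip w ≠ "" then cur ++ [w] else cur) = cur ++ [w] by
      simp [hstrip, hne]]
    by_cases heq : w = L
    · rw [if_pos ⟨by simp, Or.inr (by rw [hL, heq])⟩]
      rw [ih (acc ++ [assemble_word (PySem.Str.join " " (cur ++ [w]))]) [] htok (by simp)]
      rw [assemble_word_join _ hcur']
      simp [groupsC, heq]
    · rw [if_neg ?_]
      · rw [ih acc (cur ++ [w]) htok hcur']
        simp [groupsC, heq]
      · rintro ⟨-, h | h⟩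
        · exact hne (by rw [← hstrip, h])
        · rw [hL] at h
          exact heq (Option.some.inj h).symm

-- when L does not occur before the end, A's grouping yields the single full concatenation
lemma groupsC_single (L : String) : ∀ (ws cur : List String), L ∉ ws →
    groupsC L cur (ws ++ [L]) = [PySem.Str.join "" (cur ++ (ws ++ [L]))] := by
  intro ws
  induction ws with
  | nil => intro cur _; simp [groupsC]
  | cons w t ih =>
    intro cur hmem
    have hw : w ≠ L := fun h => hmem (by simp [h])
    have ht : L ∉ t := fun h => hmem (List.mem_cons_of_mem _ h)
    simp only [List.cons_append, groupsC, hw, if_false]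
    rw [ih (cur ++ [w]) ht]
    simp

-- A flushes one group per occurrence of L
lemma groupsC_length (L : String) : ∀ (ws cur : List String),
    (groupsC L cur ws).length = ws.count L := by
  intro ws
  induction ws with
  | nil => intro cur; simp [groupsC]
  | cons w t ih =>
    intro cur
    by_cases hw : w = L
    · simp [groupsC, hw, ih]
    · simp [groupsC, hw, ih]

lemma mem_join_nil (c : Char) : ∀ (ts : List (List Char)),
    c ∈ PySem.Chars.join [] ts → ∃ t ∈ ts, c ∈ t := by
  intro ts
  induction ts with
  | nil => intro h; rw [PySem.Chars.join_nil] at h; cases h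
  | cons a rest ih =>
    cases rest with
    | nil =>
      intro h; rw [PySem.Chars.join_singleton] at h; exact ⟨a, List.mem_cons_self, h⟩
    | cons b rest' =>
      intro h
      rw [PySem.Chars.join_cons_cons] at h
      rcases List.mem_append.mp h with h | h
      · rcases List.mem_append.mp h with h | h
        · exact ⟨a, List.mem_cons_self, h⟩
        · cases h
      · obtain ⟨t, ht, hc⟩ := ih h
        exact ⟨t, List.mem_cons_of_mem _ ht, hc⟩

-- B's output contains no space character
lemma space_not_mem_alt (s : String) : ' ' ∉ (assemble_sentence_alt s).toList := by
  intro h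
  unfold assemble_sentence_alt PySem.Str.join at h
  rw [String.toList_ofList] at h
  have he : "".toList = ([] : List Char) := rfl
  rw [he] at h
  obtain ⟨t, ht, hc⟩ := mem_join_nil _ _ h
  simp only [List.mem_map] at ht
  obtain ⟨w, hw, rfl⟩ := ht
  have := (tok_of_mem_split₀ s w hw).2 ' ' hc
  exact absurd this (by decide)

lemma space_mem_join_two (a b : String) (t : List String) :
    ' ' ∈ (PySem.Str.join " " (a :: b :: t)).toList := by
  unfold PySem.Str.join
  rw [String.toList_ofList]
  have hsp : " ".toList = [' '] := rfl
  rw [hsp, List.map_cons, List.map_cons, PySem.Chars.join_cons_cons]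
  simp

lemma A_eq_groups (s : String) (L : String)
    (hne : PySem.Str.split₀ s ≠ [])
    (hL : (PySem.Str.split₀ s).getLast? = some L) :
    assemble_sentence s = PySem.Str.join " " (groupsC L [] (PySem.Str.split₀ s)) := by
  unfold assemble_sentence
  dsimp only
  have hget : PySem.List.pyGet? (PySem.Str.split₀ s) (-1) = some L := by
    rw [pyGet_neg_one _ hne, hL]
  rw [A_fold (PySem.Str.split₀ s) L hget (PySem.Str.split₀ s) [] []
    (tok_of_mem_split₀ s) (by simp)]
  simp

-- ===== VERDICT (by name: the statement is the Claim_ definitions above) =====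
theorem assemble_sentence_spec : Claim_unchanged_assemble_sentence := by
  unfold Claim_unchanged_assemble_sentence
  intro s _
  unfold Spec_assemble_sentence
  intro hD
  by_cases hne : PySem.Str.split₀ s = []
  · unfold assemble_sentence assemble_sentence_alt
    simp only [hne, List.foldl_nil]
    rfl
  · set ws := PySem.Str.split₀ s with hws
    obtain ⟨L, hL⟩ : ∃ L, ws.getLast? = some L :=
      ⟨_, List.getLast?_eq_getLast_of_ne_nil hne⟩
    have hnotmem : L ∉ ws.dropLast := by
      intro hmem
      exact hD (by unfold D_assemble_sentence; rw [← hws, hL]; exact hmem)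
    have hsplit : ws.dropLast ++ [L] = ws := by
      have := List.dropLast_concat_getLast hne
      rwa [show ws.getLast hne = L from Option.some.inj
        (by rw [← hL, List.getLast?_eq_getLast_of_ne_nil hne])] at this
    rw [A_eq_groups s L hne hL, ← hws]
    conv_lhs => rw [← hsplit]
    rw [groupsC_single L ws.dropLast [] hnotmem]
    simp only [List.nil_append, hsplit]
    unfold assemble_sentence_alt
    rw [← hws]
    unfold PySem.Str.join
    simp only [List.map_cons, List.map_nil, String.toList_ofList, PySem.Chars.join_singleton]

theorem assemble_sentence_changed : Claim_changed_assemble_sentence := by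
  unfold Claim_changed_assemble_sentence; decide

theorem assemble_sentence_tight : Claim_exact_assemble_sentence := by
  unfold Claim_exact_assemble_sentence
  intro s _ hD heq
  set ws := PySem.Str.split₀ s with hws
  have hmem : (ws.getLast?.getD "") ∈ ws.dropLast := hD
  have hne : ws ≠ [] := by
    intro h; rw [h] at hmem; cases hmem
  obtain ⟨L, hL⟩ : ∃ L, ws.getLast? = some L :=
    ⟨_, List.getLast?_eq_getLast_of_ne_nil hne⟩
  rw [hL] at hmem
  simp only [Option.getD_some] at hmem
  have hsplit : ws.dropLast ++ [L] = ws := by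
    have := List.dropLast_concat_getLast hne
    rwa [show ws.getLast hne = L from Option.some.inj
      (by rw [← hL, List.getLast?_eq_getLast_of_ne_nil hne])] at this
  have hcount : 2 ≤ ws.count L := by
    rw [← hsplit, List.count_append]
    have h1 : 1 ≤ ws.dropLast.count L := List.one_le_count_iff.mpr hmem
    have h2 : List.count L [L] = 1 := by simp
    omega
  have hlen : 2 ≤ (groupsC L [] ws).length := by
    rw [groupsC_length]; exact hcount
  obtain ⟨a, gs, hgs0⟩ := List.exists_cons_of_ne_nil
    (show groupsC L [] ws ≠ [] by intro h; rw [h] at hlen; simp at hlen)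
  obtain ⟨b, t, hgs1⟩ := List.exists_cons_of_ne_nil
    (show gs ≠ [] by intro h; rw [hgs0, h] at hlen; simp at hlen)
  have hgs : groupsC L [] ws = a :: b :: t := by rw [hgs0, hgs1]
  have hA : assemble_sentence s = PySem.Str.join " " (a :: b :: t) := by
    rw [A_eq_groups s L hne hL, ← hws, hgs]
  have hspace : ' ' ∈ (assemble_sentence s).toList := by
    rw [hA]; exact space_mem_join_two a b t
  rw [heq] at hspace
  exact space_not_mem_alt s hspace
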